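-- pv_equiv track=rewrite | github.com/jasonj2333/Python_SPP | iepypm/Rozdzial 1/zadanie1.9.py | zad_a
-- ===== SOURCE A (Python) =====
-- def zad_a(n):
--     s=0
--     k=2
--     for i in range(1, n + 1):
--         if i % 2: s -= k
--         else: s += k
--         k += 3
--     return s
-- ===== SOURCE B (Python) =====
-- def zad_a(n):
--     if n <= 0:
--         return 0
--     if n % 2 == 0:
--         return 3 * n // 2
--     return 3 * (n - 1) // 2 - (3 * n - 1)
-- ===== Notes on version B (the rewrite author's own statement) =====
-- stated objective: faster
-- what changed: Replaced the linear signed-accumulation loop by a closed-form formula: each consecutive (minus, plus) pair of terms contributes a constant, so the sum is computed directly, with the last term subtracted separately when n is odd.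
import Mathlib
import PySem

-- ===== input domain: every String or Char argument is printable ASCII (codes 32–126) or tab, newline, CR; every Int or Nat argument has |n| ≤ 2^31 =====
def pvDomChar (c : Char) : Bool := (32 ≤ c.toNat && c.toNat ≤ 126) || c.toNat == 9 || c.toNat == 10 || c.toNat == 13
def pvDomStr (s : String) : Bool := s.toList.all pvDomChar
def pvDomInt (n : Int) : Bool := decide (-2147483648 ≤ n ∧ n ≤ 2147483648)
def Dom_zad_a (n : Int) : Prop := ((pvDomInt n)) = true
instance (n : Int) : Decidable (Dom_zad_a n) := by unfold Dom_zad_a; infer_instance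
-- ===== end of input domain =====

-- B replaces A's O(n) alternating-sum loop by a closed-form O(1) formula (objective: faster, asymptotic).

-- ===== PORT A =====
-- literal port of A's loop: state (s, k), iterating i over range(1, n+1)
def zad_a (n : Int) : Int :=
  ((PySem.List.pyRange 1 (n + 1) 1).foldl
    (fun (sk : Int × Int) (i : Int) =>
      (if PySem.Int.mod i 2 ≠ 0 then sk.1 - sk.2 else sk.1 + sk.2, sk.2 + 3))
    (0, 2)).1

-- ===== PORT B =====
def zad_a_alt (n : Int) : Int :=
  if n ≤ 0 then 0
  else if PySem.Int.mod n 2 = 0 then PySem.Int.floordiv (3 * n) 2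
  else PySem.Int.floordiv (3 * (n - 1)) 2 - (3 * n - 1)

-- ===== PRECONDITION & SPEC =====
def Spec_zad_a (n : Int) (out : Int) : Prop := out = zad_a_alt n
instance (n : Int) (out : Int) : Decidable (Spec_zad_a n out) := by unfold Spec_zad_a; infer_instance

-- ===== CLAIM (what is proved, stated in full; the proofs are below) =====
def Claim_equal_zad_a : Prop := ∀ (n : Int), Dom_zad_a n → Spec_zad_a n (zad_a n)

-- ===== LEMMAS AND PROOFS =====

-- loop invariant: after m iterations the state is (B's value at m, 2 + 3m)
lemma zad_a_loop_inv (m : Nat) :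
    (PySem.List.pyRange 1 ((m : Int) + 1) 1).foldl
      (fun (sk : Int × Int) (i : Int) =>
        (if PySem.Int.mod i 2 ≠ 0 then sk.1 - sk.2 else sk.1 + sk.2, sk.2 + 3))
      (0, 2)
    = (zad_a_alt (m : Int), 2 + 3 * (m : Int)) := by
  induction m with
  | zero =>
      rw [PySem.List.pyRange_one_eq_nil (by omega)]
      simp [zad_a_alt]
  | succ m ih =>
      have h : ((m : Int) + 1 + 1) = ((m : Int) + 1) + 1 := by ring
      rw [show ((m + 1 : Nat) : Int) = (m : Int) + 1 by push_cast; ring, h,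
        PySem.List.pyRange_one_succ_right (by omega), List.foldl_append, ih]
      simp only [List.foldl_cons, List.foldl_nil]
      have hm2 : ∀ a : Int, PySem.Int.mod a 2 = a % 2 :=
        fun a => PySem.Int.mod_eq_emod_of_pos (by omega)
      have hd2 : ∀ a : Int, PySem.Int.floordiv a 2 = a / 2 :=
        fun a => PySem.Int.floordiv_eq_ediv_of_pos (by omega)
      simp only [zad_a_alt, hm2, hd2]
      refine Prod.ext ?_ (by ring)
      simp only
      split_ifs <;> omega

theorem zad_a_eq (n : Int) : zad_a n = zad_a_alt n := by
  by_cases hn : n ≤ 0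
  · unfold zad_a
    rw [PySem.List.pyRange_one_eq_nil (by omega)]
    simp [zad_a_alt, hn]
  · obtain ⟨m, rfl⟩ : ∃ m : Nat, n = (m : Int) :=
      ⟨n.toNat, (Int.toNat_of_nonneg (by omega)).symm⟩
    unfold zad_a
    rw [zad_a_loop_inv]

-- ===== VERDICT (by name: the statement is the Claim_ definition above) =====
theorem zad_a_spec : Claim_equal_zad_a := by
  intro n _
  exact zad_a_eq n
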